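-- pv_equiv track=rewrite | github.com/Rilkon/adventofcode | 2025/day01/day01.py | part1
-- ===== SOURCE A (Python) =====
-- def part1(data):
--     position = 50
--     count = 0
--
--     for instr in data:
--         position = (position + (instr[0] * instr[1])) % 100
--         if position == 0:
--             count += 1
--
--     return count
-- ===== SOURCE B (Python) =====
-- def part1(data):
--     # Stage 1: materialise the whole walk (list of positions after each step).
--     positions = []
--     pos = 50
--     for a, b in data:
--         pos = (pos + a * b) % 100
--         positions.append(pos)
--     # Stage 2: histogram of positions, then read off how often position 0 occurred.
--     hist = {}
--     for p in positions:
--         hist[p] = hist.get(p, 0) + 1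
--     return hist.get(0, 0)
-- ===== Notes on version B (the rewrite author's own statement) =====
-- stated objective: alternative
-- what changed: B separates the walk from the counting: it first materialises the full list of visited positions, then builds a dict histogram of all positions and returns the histogram entry for 0, instead of A's fused loop that increments a counter inside the walk.
import Mathlib
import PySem

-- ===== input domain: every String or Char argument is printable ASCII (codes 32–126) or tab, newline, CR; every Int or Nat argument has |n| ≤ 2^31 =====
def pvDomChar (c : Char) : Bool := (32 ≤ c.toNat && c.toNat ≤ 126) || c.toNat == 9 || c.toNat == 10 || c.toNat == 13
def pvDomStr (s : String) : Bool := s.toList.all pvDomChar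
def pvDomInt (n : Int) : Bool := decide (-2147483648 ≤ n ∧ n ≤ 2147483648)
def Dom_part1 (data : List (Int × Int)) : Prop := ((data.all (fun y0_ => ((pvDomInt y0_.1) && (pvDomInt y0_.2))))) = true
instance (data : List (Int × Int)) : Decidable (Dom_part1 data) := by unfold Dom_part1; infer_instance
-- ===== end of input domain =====

-- B stages the computation: materialise the list of visited positions, histogram it, read entry 0.
-- ===== PORT A =====
def part1 (data : List (Int × Int)) : Int :=
  (data.foldl (fun (st : Int × Int) instr =>
      let position := PySem.Int.mod (st.1 + instr.1 * instr.2) 100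
      (position, if position = 0 then st.2 + 1 else st.2))
    (50, 0)).2

-- ===== PORT B =====
def part1_alt (data : List (Int × Int)) : Int :=
  let positions := (data.foldl (fun (st : Int × List Int) instr =>
      let pos := PySem.Int.mod (st.1 + instr.1 * instr.2) 100
      (pos, st.2 ++ [pos])) (50, [])).2
  let hist := positions.foldl
      (fun (d : PySem.Dict Int Int) p => d.insert p (d.getD p 0 + 1)) PySem.Dict.empty
  hist.getD 0 0

-- ===== PRECONDITION & SPEC =====
def Spec_part1 (data : List (Int × Int)) (out : Int) : Prop := out = part1_alt data
instance (data : List (Int × Int)) (out : Int) : Decidable (Spec_part1 data out) := by unfold Spec_part1; infer_instance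

-- ===== CLAIM =====
def Claim_equal_part1 : Prop := ∀ (data : List (Int × Int)), Dom_part1 data → Spec_part1 data (part1 data)

-- ===== LEMMAS AND PROOFS =====
-- The position-list fold with accumulator acc is acc ++ the fold started from [] (generic step g).
lemma pos_fold_acc (g : Int → Int × Int → Int) (data : List (Int × Int)) (p : Int) (acc : List Int) :
    (data.foldl (fun (st : Int × List Int) x => (g st.1 x, st.2 ++ [g st.1 x])) (p, acc)).2
    = acc ++ (data.foldl (fun (st : Int × List Int) x => (g st.1 x, st.2 ++ [g st.1 x])) (p, [])).2 := by
  induction data generalizing p acc with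
  | nil => simp
  | cons hd tl ih =>
    simp only [List.foldl_cons, List.nil_append]
    rw [ih, ih (g p hd) [g p hd]]
    simp

-- A's fused counter equals the count of zeros in the materialised position list (generic step g).
lemma count_fold (g : Int → Int × Int → Int) (data : List (Int × Int)) (p c : Int) :
    (data.foldl (fun (st : Int × Int) x =>
      (g st.1 x, if g st.1 x = 0 then st.2 + 1 else st.2)) (p, c)).2
    = c + ((data.foldl (fun (st : Int × List Int) x =>
      (g st.1 x, st.2 ++ [g st.1 x])) (p, [])).2).count 0 := by
  induction data generalizing p c with
  | nil => simp
  | cons hd tl ih =>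
    simp only [List.foldl_cons, List.nil_append]
    rw [ih, pos_fold_acc g tl (g p hd) [g p hd]]
    simp only [List.count_append, List.count_singleton]
    by_cases h : g p hd = 0
    · simp only [h, if_pos, BEq.rfl]
      push_cast; ring
    · simp only [beq_iff_eq, h, if_false]
      simp

-- ===== VERDICT =====
theorem part1_spec : Claim_equal_part1 := by
  intro data _
  unfold Spec_part1 part1 part1_alt
  have h := count_fold (fun p x => PySem.Int.mod (p + x.1 * x.2) 100) data 50 0
  simp only at h
  rw [show (data.foldl (fun (st : Int × Int) instr =>
      let position := PySem.Int.mod (st.1 + instr.1 * instr.2) 100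
      (position, if position = 0 then st.2 + 1 else st.2)) (50, 0)).2
    = 0 + ((data.foldl (fun (st : Int × List Int) instr =>
      let pos := PySem.Int.mod (st.1 + instr.1 * instr.2) 100
      (pos, st.2 ++ [pos])) (50, [])).2).count 0 from h]
  rw [PySem.Dict.getD_foldl_insert_add_one]
  simp [PySem.Dict.getD_empty]
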